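-- pv_equiv track=rewrite | github.com/daniel-reich/ubiquitous-fiesta | WH8AfHodqyj4gSB8K_23.py | is_authentic_skewer
-- ===== SOURCE A (Python) =====
-- def is_authentic_skewer(s):
--   H=None;E=False;D='-';C='AEIOU'
--   if s[0]in C or s[0]==D:return E
--   if s[-1]in C or s[-1]==D:return E
--   G=0;F=0
--   for A in s[1:]:
--     if A==D:G+=1
--     else:break
--   for A in s[1:]:
--     if F>G:return E
--     elif A!=D:
--       if F!=G:return E
--       F=0
--     elif A==D:F+=1
--   B=H
--   for A in s:
--     if A in C and B==0:return E
--     elif A not in C and A!=D and B==1:return E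
--     elif A in C and(B==1 or B==H):B=0
--     elif A not in C and A!=D and(B==0 or B==H):B=1
--   return True
-- ===== SOURCE B (Python) =====
-- def is_authentic_skewer(s):
--     if s[0] in 'AEIOU' or s[0] == '-':
--         return False
--     if s[-1] in 'AEIOU' or s[-1] == '-':
--         return False
--     # one run-length tokenization pass: runs of dashes / non-dashes
--     runs = []  # list of [is_dash, length]
--     for ch in s:
--         d = ch == '-'
--         if runs and runs[-1][0] == d:
--             runs[-1][1] += 1
--         else:
--             runs.append([d, 1])
--     dash_runs = [n for d, n in runs if d]
--     letter_runs = [n for d, n in runs if not d]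
--     sep = dash_runs[0] if dash_runs else 0
--     if any(n != sep for n in dash_runs):
--         return False
--     if sep > 0 and any(n != 1 for n in letter_runs):
--         return False
--     kinds = [ch in 'AEIOU' for ch in s if ch != '-']
--     return all(a != b for a, b in zip(kinds, kinds[1:]))
-- ===== Notes on version B (the rewrite author's own statement) =====
-- stated objective: alternative
-- what changed: A's three stateful scans (leading-dash count G, separator counter F with early returns, and a vowel/consonant mode variable B) are replaced by one run-length tokenization of the string into (is_dash, length) runs validated declaratively (all dash runs equal the first one, letter runs of length 1 when a separator exists) plus an adjacent-pair alternation check on the dash-filtered letters.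
import Mathlib
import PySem

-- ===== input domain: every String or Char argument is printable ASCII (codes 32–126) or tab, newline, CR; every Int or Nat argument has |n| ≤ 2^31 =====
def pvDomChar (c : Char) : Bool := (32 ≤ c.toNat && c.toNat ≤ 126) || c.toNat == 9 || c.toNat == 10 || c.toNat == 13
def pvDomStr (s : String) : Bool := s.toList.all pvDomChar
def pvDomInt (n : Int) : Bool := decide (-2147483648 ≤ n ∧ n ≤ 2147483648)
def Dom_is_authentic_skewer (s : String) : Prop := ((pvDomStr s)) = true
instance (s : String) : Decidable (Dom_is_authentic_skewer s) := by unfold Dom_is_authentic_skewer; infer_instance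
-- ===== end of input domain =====

-- B replaces A's three stateful counter scans by one run-length tokenization whose runs are
-- validated declaratively (objective: alternative algorithm, same O(n) cost).

-- ===== PORT A =====
-- `A in C` with C = 'AEIOU' and A a single character is character membership (exact).
def pvA_vowel (c : Char) : Bool := ['A', 'E', 'I', 'O', 'U'].contains c

-- first loop: `for A in s[1:]: if A=='-': G+=1 else: break`
def pvA_countG : List Char → Int
  | [] => 0
  | c :: rest => if c == '-' then 1 + pvA_countG rest else 0

-- second loop over s[1:] with counter F (early `return False` = result false)
def pvA_loop2 (G : Int) : List Char → Int → Bool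
  | [], _ => true
  | c :: rest, F =>
    if F > G then false
    else if c != '-' then (if F != G then false else pvA_loop2 G rest 0)
    else pvA_loop2 G rest (F + 1)

-- third loop over s with mode variable B ∈ {None, 0, 1}
def pvA_loop3 : List Char → Option Int → Bool
  | [], _ => true
  | c :: rest, B =>
    if pvA_vowel c && B == some 0 then false
    else if !pvA_vowel c && c != '-' && B == some 1 then false
    else if pvA_vowel c && (B == some 1 || B == none) then pvA_loop3 rest (some 0)
    else if !pvA_vowel c && c != '-' && (B == some 0 || B == none) then pvA_loop3 rest (some 1)
    else pvA_loop3 rest B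

def is_authentic_skewer (s : String) : Bool :=
  let l := s.toList
  match PySem.List.pyGet? l 0, PySem.List.pyGet? l (-1) with
  | some c0, some cl =>
    if pvA_vowel c0 || c0 == '-' then false
    else if pvA_vowel cl || cl == '-' then false
    else
      let tl := PySem.List.slice l (some 1) none
      let G := pvA_countG tl
      if pvA_loop2 G tl 0 then pvA_loop3 l none else false
  | _, _ => false  -- s[0] / s[-1] raise IndexError on the empty string (excluded by Pre_)

-- ===== PORT B =====
def pvB_vowel (c : Char) : Bool := ['A', 'E', 'I', 'O', 'U'].contains c

-- one step of the run-building loop (`runs[-1][1] += 1` or append a fresh run);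
-- the list is built head-first and reversed at the end (Python appends at the tail).
def pvB_step (acc : List (Bool × Int)) (ch : Char) : List (Bool × Int) :=
  let d := ch == '-'
  match acc with
  | (d', n) :: rest => if d' == d then (d', n + 1) :: rest else (d, 1) :: (d', n) :: rest
  | [] => [(d, 1)]

-- `dash_runs = [n for d, n in runs if d]`
def pvB_dashRuns (runs : List (Bool × Int)) : List Int :=
  (runs.filter (fun r => r.1)).map (fun r => r.2)

-- `letter_runs = [n for d, n in runs if not d]`
def pvB_letterRuns (runs : List (Bool × Int)) : List Int :=
  (runs.filter (fun r => !r.1)).map (fun r => r.2)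

def is_authentic_skewer_alt (s : String) : Bool :=
  let l := s.toList
  match PySem.List.pyGet? l 0 with
  | none => false  -- s[0] raises IndexError on the empty string (excluded by Pre_)
  | some c0 =>
   match PySem.List.pyGet? l (-1) with
   | none => false
   | some cl =>
    if pvB_vowel c0 || c0 == '-' then false
    else if pvB_vowel cl || cl == '-' then false
    else
      let runs := (l.foldl pvB_step []).reverse
      let dashRuns := pvB_dashRuns runs
      let letterRuns := pvB_letterRuns runs
      let sep := dashRuns.headD 0
      if dashRuns.any (fun n => n != sep) then false
      else if decide (0 < sep) && letterRuns.any (fun n => n != 1) then false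
      else
        let kinds := (l.filter (fun c => c != '-')).map pvB_vowel
        (kinds.zip kinds.tail).all (fun p => p.1 != p.2)

-- ===== PRECONDITION & SPEC =====
-- Pre_ excludes only the empty string, on which A raises IndexError at s[0] (B raises there too).
def Pre_is_authentic_skewer (s : String) : Prop := s.toList ≠ []
instance (s : String) : Decidable (Pre_is_authentic_skewer s) := by
  unfold Pre_is_authentic_skewer; infer_instance
def pvWitness_is_authentic_skewer : String := "B-A-B"

def Spec_is_authentic_skewer (s : String) (out : Bool) : Prop := out = is_authentic_skewer_alt s
instance (s : String) (out : Bool) : Decidable (Spec_is_authentic_skewer s out) := by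
  unfold Spec_is_authentic_skewer; infer_instance

-- ===== CLAIM (what is proved, stated in full; the proofs are below) =====
def Claim_equal_is_authentic_skewer : Prop := ∀ (s : String), Dom_is_authentic_skewer s → Pre_is_authentic_skewer s → Spec_is_authentic_skewer s (is_authentic_skewer s)

-- ===== LEMMAS AND PROOFS =====

-- run-length encoding defined by structural recursion (proof-side mirror of the foldl)
def pvConsFuse (p : Bool × Int) (rs : List (Bool × Int)) : List (Bool × Int) :=
  match rs with
  | (d', m) :: tl => if p.1 == d' then (p.1, p.2 + m) :: tl else p :: (d', m) :: tl
  | [] => [p]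

def pvRuns : List Char → List (Bool × Int)
  | [] => []
  | c :: t => pvConsFuse ((c == '-'), 1) (pvRuns t)

lemma pvConsFuse_head (p : Bool × Int) (rs : List (Bool × Int)) :
    ∃ m tl, pvConsFuse p rs = (p.1, m) :: tl := by
  match rs with
  | [] => exact ⟨p.2, [], rfl⟩
  | (d', m') :: tl =>
    by_cases h : p.1 = d'
    · exact ⟨p.2 + m', tl, by simp [pvConsFuse, h]⟩
    · exact ⟨p.2, (d', m') :: tl, by simp [pvConsFuse, h]⟩

lemma pvConsFuse_add (d : Bool) (n : Int) (rs : List (Bool × Int)) :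
    pvConsFuse (d, n + 1) rs = pvConsFuse (d, n) (pvConsFuse (d, 1) rs) := by
  match rs with
  | [] => simp [pvConsFuse]
  | (d', m') :: tl =>
    by_cases h : d = d'
    · subst h; simp [pvConsFuse]; ring
    · simp [pvConsFuse, h]

lemma pvFoldl_aux (l : List Char) : ∀ (d : Bool) (n : Int) (r : List (Bool × Int)),
    (List.foldl pvB_step ((d, n) :: r) l).reverse = r.reverse ++ pvConsFuse (d, n) (pvRuns l) := by
  induction l with
  | nil => intro d n r; simp [pvConsFuse, pvRuns]
  | cons c l' ih =>
    intro d n r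
    by_cases h : d = (c == '-')
    · have hstep : pvB_step ((d, n) :: r) c = (d, n + 1) :: r := by
        simp [pvB_step, h]
      simp only [List.foldl_cons, hstep, ih]
      have : pvRuns (c :: l') = pvConsFuse ((c == '-'), 1) (pvRuns l') := rfl
      rw [this, ← h, ← pvConsFuse_add]
    · have hstep : pvB_step ((d, n) :: r) c = ((c == '-'), 1) :: (d, n) :: r := by
        simp [pvB_step]
        intro h'; exact absurd h' h
      simp only [List.foldl_cons, hstep, ih]
      obtain ⟨m, tl, hm⟩ := pvConsFuse_head ((c == '-'), (1 : Int)) (pvRuns l')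
      have : pvRuns (c :: l') = pvConsFuse ((c == '-'), 1) (pvRuns l') := rfl
      rw [this, hm]
      have : pvConsFuse (d, n) (((c == '-'), m) :: tl) = (d, n) :: ((c == '-'), m) :: tl := by
        simp [pvConsFuse, h]
      rw [this]; simp

lemma pvRuns_foldl (l : List Char) : (List.foldl pvB_step [] l).reverse = pvRuns l := by
  match l with
  | [] => rfl
  | c :: l' =>
    have hstep : pvB_step [] c = [((c == '-'), 1)] := rfl
    simp only [List.foldl_cons, hstep, pvFoldl_aux]
    rfl

lemma pvRuns_eq_nil (t : List Char) : pvRuns t = [] ↔ t = [] := by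
  constructor
  · intro h
    match t with
    | [] => rfl
    | c :: t' =>
      obtain ⟨m, tl, hm⟩ := pvConsFuse_head ((c == '-'), (1 : Int)) (pvRuns t')
      rw [show pvRuns (c :: t') = pvConsFuse ((c == '-'), 1) (pvRuns t') from rfl, hm] at h
      exact absurd h (by simp)
  · intro h; subst h; rfl

lemma pvRuns_pos (t : List Char) : ∀ p ∈ pvRuns t, 1 ≤ p.2 := by
  induction t with
  | nil => simp [pvRuns]
  | cons c t' ih =>
    intro p hp
    rw [show pvRuns (c :: t') = pvConsFuse ((c == '-'), 1) (pvRuns t') from rfl] at hp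
    match hrt : pvRuns t' with
    | [] => rw [hrt] at hp; simp [pvConsFuse] at hp; simp [hp]
    | (d', m') :: tl =>
      have hm' : 1 ≤ m' := by have := ih (d', m') (by rw [hrt]; exact List.mem_cons_self); simpa using this
      rw [hrt] at hp
      by_cases h : (c == '-') = d'
      · simp [pvConsFuse, h] at hp
        rcases hp with h1 | h1
        · rw [h1]; simp; omega
        · exact ih p (by rw [hrt]; exact List.mem_cons_of_mem _ h1)
      · simp [pvConsFuse, h] at hp
        rcases hp with h1 | h1 | h1
        · rw [h1]
        · rw [h1]; simp; omega
        · exact ih p (by rw [hrt]; exact List.mem_cons_of_mem _ h1)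

lemma pvRuns_alt (t : List Char) : (pvRuns t).IsChain (fun a b => a.1 ≠ b.1) := by
  induction t with
  | nil => exact List.isChain_nil
  | cons c t' ih =>
    rw [show pvRuns (c :: t') = pvConsFuse ((c == '-'), 1) (pvRuns t') from rfl]
    match hrt : pvRuns t' with
    | [] => exact List.isChain_singleton _
    | [(d', m')] =>
      by_cases h : (c == '-') = d'
      · simp [pvConsFuse, h]
      · simp only [pvConsFuse, h, if_neg]
        simp [List.isChain_cons_cons, h]
    | (d', m') :: (d2, m2) :: tl =>
      rw [hrt] at ih
      by_cases h : (c == '-') = d'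
      · rw [List.isChain_cons_cons] at ih
        rw [h]
        have he : pvConsFuse (d', 1) ((d', m') :: (d2, m2) :: tl) = (d', 1 + m') :: (d2, m2) :: tl := by
          simp [pvConsFuse]
        rw [he, List.isChain_cons_cons]
        exact ⟨ih.1, ih.2⟩
      · have hne : ((c == '-') == d') = false := by simp [h]
        have he : pvConsFuse ((c == '-'), 1) ((d', m') :: (d2, m2) :: tl) = ((c == '-'), 1) :: (d', m') :: (d2, m2) :: tl := by
          simp only [pvConsFuse, hne]; rfl
        rw [he, List.isChain_cons_cons]
        exact ⟨h, ih⟩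

def pvHeadDash : List (Bool × Int) → Int
  | (true, n) :: _ => n
  | _ => 0

lemma pvCountG_runs (t : List Char) : pvA_countG t = pvHeadDash (pvRuns t) := by
  induction t with
  | nil => rfl
  | cons c t' ih =>
    rw [show pvRuns (c :: t') = pvConsFuse ((c == '-'), 1) (pvRuns t') from rfl]
    by_cases hc : c = '-'
    · subst hc
      rw [show pvA_countG ('-' :: t') = 1 + pvA_countG t' from by simp [pvA_countG]]
      match hrt : pvRuns t' with
      | [] =>
        have : pvA_countG t' = 0 := by rw [ih, hrt]; rfl
        simp [pvConsFuse, pvHeadDash, this]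
      | (true, m') :: tl =>
        have : pvA_countG t' = m' := by rw [ih, hrt]; rfl
        simp [pvConsFuse, pvHeadDash, this]
      | (false, m') :: tl =>
        have : pvA_countG t' = 0 := by rw [ih, hrt]; rfl
        simp [pvConsFuse, pvHeadDash, this]
    · have hcb : (c == '-') = false := by simp [hc]
      rw [show pvA_countG (c :: t') = 0 from by simp [pvA_countG, hcb]]
      obtain ⟨m, tl, hm⟩ := pvConsFuse_head ((c == '-'), (1 : Int)) (pvRuns t')
      rw [hcb] at hm ⊢
      rw [hm]; rfl

-- the second loop expressed on the run list
def pvCheckR (G : Int) : Int → List (Bool × Int) → Bool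
  | _, [] => true
  | F, (true, n) :: tl => (F + n == G) && pvCheckR G G tl
  | F, (false, m) :: tl => (F == G) && ((G == 0) || (m == 1)) && pvCheckR G 0 tl

lemma pvLoop2_checkR (G : Int) : ∀ (t : List Char) (F : Int), t.getLast? ≠ some '-' →
    pvA_loop2 G t F = pvCheckR G F (pvRuns t) := by
  intro t
  induction t with
  | nil => intro F _; rfl
  | cons c t' ih =>
    intro F hlast
    have hrw : pvRuns (c :: t') = pvConsFuse ((c == '-'), 1) (pvRuns t') := rfl
    by_cases hd : c = '-'
    · subst hd
      have ht' : t' ≠ [] := by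
        intro h; subst h; exact hlast rfl
      have hlast' : t'.getLast? ≠ some '-' := by
        match ht2 : t' with
        | [] => simp
        | c2 :: t2 =>
          rw [List.getLast?_cons_cons] at hlast
          exact hlast
      have hl2 : pvA_loop2 G ('-' :: t') F = if F > G then false else pvA_loop2 G t' (F + 1) := by
        simp [pvA_loop2]
      match hrt : pvRuns t' with
      | [] => exact absurd ((pvRuns_eq_nil _).mp hrt) ht'
      | (true, n) :: tl =>
        have hn : 1 ≤ n := by
          simpa using pvRuns_pos t' (true, n) (by rw [hrt]; exact List.mem_cons_self)
        have he : pvRuns ('-' :: t') = (true, 1 + n) :: tl := by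
          rw [hrw, hrt]; simp [pvConsFuse]
        rw [hl2, he]
        by_cases hFG : F > G
        · have : (F + (1 + n) == G) = false := by simp; omega
          simp [hFG, pvCheckR, this]
        · have e1 : ((F + 1) + n) = F + (1 + n) := by ring
          rw [if_neg hFG, ih (F + 1) hlast', hrt]
          simp only [pvCheckR, e1]
      | (false, m) :: tl =>
        have he : pvRuns ('-' :: t') = (true, 1) :: (false, m) :: tl := by
          rw [hrw, hrt]; simp [pvConsFuse]
        rw [hl2, he]
        by_cases hFG : F > G
        · have : (F + 1 == G) = false := by simp; omega
          simp [hFG, pvCheckR, this]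
        · rw [if_neg hFG, ih (F + 1) hlast', hrt]
          simp [pvCheckR, Bool.and_assoc]
    · have hdb : (c == '-') = false := by simp [hd]
      have hlast' : t'.getLast? ≠ some '-' := by
        match ht2 : t' with
        | [] => simp
        | c2 :: t2 =>
          rw [List.getLast?_cons_cons] at hlast
          exact hlast
      have hl2 : pvA_loop2 G (c :: t') F =
          if F > G then false else if F != G then false else pvA_loop2 G t' 0 := by
        simp [pvA_loop2, hd]
      match hrt : pvRuns t' with
      | [] =>
        have ht0 : t' = [] := (pvRuns_eq_nil _).mp hrt
        have he : pvRuns (c :: t') = [(false, 1)] := by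
          rw [hrw, hrt, hdb]; rfl
        rw [hl2, he, ht0]
        by_cases hFG : F > G
        · have : (F == G) = false := by simp; omega
          simp [hFG, pvCheckR, this]
        · by_cases hFeq : F = G
          · subst hFeq
            simp [hFG, pvCheckR, pvA_loop2]
          · have h1 : (F != G) = true := by simp [hFeq]
            have h2 : (F == G) = false := by simp [hFeq]
            simp [hFG, h1, pvCheckR, h2]
      | (true, n) :: tl =>
        have he : pvRuns (c :: t') = (false, 1) :: (true, n) :: tl := by
          rw [hrw, hrt, hdb]; rfl
        rw [hl2, he]
        by_cases hFG : F > G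
        · have : (F == G) = false := by simp; omega
          simp [hFG, pvCheckR, this]
        · by_cases hFeq : F = G
          · subst hFeq
            rw [if_neg hFG]
            have h1 : (F != F) = false := by simp
            rw [h1]
            simp only [Bool.false_eq_true, if_false]
            rw [ih 0 hlast', hrt]
            simp [pvCheckR]
          · have h1 : (F != G) = true := by simp [hFeq]
            have h2 : (F == G) = false := by simp [hFeq]
            simp [hFG, h1, pvCheckR, h2]
      | (false, m) :: tl =>
        have hm : 1 ≤ m := by
          simpa using pvRuns_pos t' (false, m) (by rw [hrt]; exact List.mem_cons_self)
        have he : pvRuns (c :: t') = (false, 1 + m) :: tl := by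
          rw [hrw, hrt]; simp [pvConsFuse, hdb]
        rw [hl2, he]
        by_cases hFG : F > G
        · have : (F == G) = false := by simp; omega
          simp [hFG, pvCheckR, this]
        · by_cases hFeq : F = G
          · subst hFeq
            rw [if_neg hFG]
            have h1 : (F != F) = false := by simp
            rw [h1]
            simp only [Bool.false_eq_true, if_false]
            rw [ih 0 hlast', hrt]
            have hm1 : ((1 + m) == (1 : Int)) = false := by simp; omega
            by_cases hG : F = 0
            · subst hG
              simp [pvCheckR, hm1]
            · have hG2 : ((F == (0 : Int))) = false := by simp [hG]
              have hG3 : (((0 : Int) == F)) = false := by simp; omega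
              simp [pvCheckR, hm1, hG2, hG3]
          · have h1 : (F != G) = true := by simp [hFeq]
            have h2 : (F == G) = false := by simp [hFeq]
            simp [hFG, h1, pvCheckR, h2]

lemma pvCheckR_zero : ∀ u : List (Bool × Int), (∀ p ∈ u, 1 ≤ p.2) →
    pvCheckR 0 0 u = !(u.any (fun p => p.1)) := by
  intro u
  induction u with
  | nil => intro _; rfl
  | cons p tl ih =>
    intro hpos
    obtain ⟨d, k⟩ := p
    have hk : 1 ≤ k := by simpa using hpos (d, k) List.mem_cons_self
    have htl := fun q hq => hpos q (List.mem_cons_of_mem _ hq)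
    cases d
    · simp [pvCheckR, ih htl]
    · have : (0 + k == (0 : Int)) = false := by simp; omega
      simp [pvCheckR, this]
      intro h0
      exact absurd h0 (by omega)

def pvAllRun (n : Int) (u : List (Bool × Int)) : Bool :=
  u.all (fun p => if p.1 then p.2 == n else p.2 == 1)

lemma pvCheckR_all (n : Int) (hn : 1 ≤ n) : ∀ u : List (Bool × Int),
    u.IsChain (fun a b => a.1 ≠ b.1) →
    ((u.head?.map Prod.fst ≠ some true → pvCheckR n n u = pvAllRun n u) ∧
     (u.head?.map Prod.fst = some true → pvCheckR n 0 u = pvAllRun n u)) := by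
  intro u
  induction u with
  | nil => exact fun _ => ⟨fun _ => rfl, fun _ => rfl⟩
  | cons p tl ih =>
    intro hch
    obtain ⟨d, k⟩ := p
    have hch' : tl.IsChain (fun a b => a.1 ≠ b.1) := by
      match tl with
      | [] => exact List.isChain_nil
      | q :: tl' => exact (List.isChain_cons_cons.mp hch).2
    have ihtl := ih hch'
    have hn0 : ((n == (0 : Int)) = false) := by simp; omega
    constructor
    · intro hhead
      have hd : d = false := by
        by_contra hdt
        exact hhead (by simp at hdt; simp [hdt])
      subst hd
      have hrec : pvCheckR n 0 tl = pvAllRun n tl := by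
        cases tl with
        | nil => rfl
        | cons q tl2 =>
          obtain ⟨d2, k2⟩ := q
          have h12 := (List.isChain_cons_cons.mp hch).1
          have hd2 : d2 = true := by
            cases d2
            · exact absurd rfl h12
            · rfl
          exact ihtl.2 (by simp [hd2])
      simp [pvCheckR, pvAllRun, hn0, hrec]
    · intro hhead
      have hd : d = true := by
        cases d
        · exact absurd hhead (by simp)
        · rfl
      subst hd
      have hrec : pvCheckR n n tl = pvAllRun n tl := by
        cases tl with
        | nil => rfl
        | cons q tl2 =>
          obtain ⟨d2, k2⟩ := q
          have h12 := (List.isChain_cons_cons.mp hch).1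
          have hd2 : d2 = false := by
            cases d2
            · rfl
            · exact absurd rfl h12
          exact ihtl.1 (by simp [hd2])
      simp [pvCheckR, pvAllRun, hrec]

lemma pvAllRun_split (n : Int) (u : List (Bool × Int)) :
    pvAllRun n u = ((pvB_dashRuns u).all (fun k => k == n) && (pvB_letterRuns u).all (fun k => k == 1)) := by
  induction u with
  | nil => rfl
  | cons p tl ih =>
    obtain ⟨d, k⟩ := p
    cases d
    · simp [pvAllRun, pvB_dashRuns, pvB_letterRuns] at ih ⊢
      rw [ih]
      cases h1 : (k == (1 : Int)) <;> simp [Bool.and_assoc, Bool.and_left_comm]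
    · simp [pvAllRun, pvB_dashRuns, pvB_letterRuns] at ih ⊢
      rw [ih]
      cases h1 : (k == n) <;> simp [Bool.and_assoc]

lemma pvNotAnyNe (xs : List Int) (v : Int) :
    (!(xs.any (fun x => x != v))) = xs.all (fun x => x == v) := by
  induction xs with
  | nil => rfl
  | cons x xs ih =>
    simp only [List.any_cons, List.all_cons, Bool.not_or, ← ih]
    cases hx : x == v <;> simp [bne, hx]

-- alternation: the third loop equals the pairwise check on the dash-filtered kinds
def pvPairAll : Option Bool → List Bool → Bool
  | _, [] => true
  | none, k :: ks => pvPairAll (some k) ks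
  | some p, k :: ks => (p != k) && pvPairAll (some k) ks

def pvEnc : Option Bool → Option Int
  | none => none
  | some true => some 0
  | some false => some 1

lemma pvLoop3_pairAll : ∀ (l : List Char) (ob : Option Bool),
    pvA_loop3 l (pvEnc ob) = pvPairAll ob ((l.filter (fun c => c != '-')).map pvB_vowel) := by
  intro l
  induction l with
  | nil => intro ob; cases ob with
    | none => rfl
    | some b => cases b <;> rfl
  | cons c rest ih =>
    intro ob
    by_cases hd : c = '-'
    · subst hd
      have hv : pvA_vowel '-' = false := by decide
      have hfilter : (('-' :: rest).filter (fun c => c != '-')) = rest.filter (fun c => c != '-') := by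
        simp
      rw [hfilter]
      cases ob with
      | none => simp only [pvA_loop3, hv]; simpa using ih none
      | some b =>
        cases b
        · simp only [pvA_loop3, hv, pvEnc]
          simpa [pvEnc] using ih (some false)
        · simp only [pvA_loop3, hv, pvEnc]
          simpa [pvEnc] using ih (some true)
    · have hdb : (c != '-') = true := by simp [hd]
      have hfilter : ((c :: rest).filter (fun c => c != '-')) = c :: rest.filter (fun c => c != '-') := by
        simp [hd]
      rw [hfilter]
      cases hv : pvA_vowel c
      · -- consonant
        have hvb : pvB_vowel c = false := hv
        cases ob with
        | none =>
          simp only [pvA_loop3, hv, hdb, pvEnc, List.map_cons]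
          simpa [pvEnc, hvb] using ih (some false)
        | some b =>
          cases b
          · -- previous was consonant: reject
            simp [pvA_loop3, hv, hdb, pvEnc, List.map_cons, pvPairAll, hvb]
          · -- previous was vowel
            simp only [pvA_loop3, hv, hdb, pvEnc, List.map_cons]
            have := ih (some false)
            simp only [pvEnc] at this
            simp [pvPairAll, hvb, this]
      · -- vowel
        have hvb : pvB_vowel c = true := hv
        cases ob with
        | none =>
          simp only [pvA_loop3, hv, hdb, pvEnc, List.map_cons]
          simpa [pvEnc, hvb] using ih (some true)
        | some b =>
          cases b
          · -- previous was consonant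
            simp only [pvA_loop3, hv, hdb, pvEnc, List.map_cons]
            have := ih (some true)
            simp only [pvEnc] at this
            simp [pvPairAll, hvb, this]
          · -- previous was vowel: reject
            simp [pvA_loop3, hv, hdb, pvEnc, List.map_cons, pvPairAll, hvb]

lemma pvPairAll_some_zip : ∀ (ks : List Bool) (p : Bool),
    pvPairAll (some p) ks = (((p :: ks).zip ks).all (fun q => q.1 != q.2)) := by
  intro ks
  induction ks with
  | nil => intro p; rfl
  | cons k ks ih =>
    intro p
    simp only [pvPairAll, List.zip_cons_cons, List.all_cons]
    rw [ih]

lemma pvPairAll_zip (ks : List Bool) :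
    pvPairAll none ks = ((ks.zip ks.tail).all (fun q => q.1 != q.2)) := by
  match ks with
  | [] => rfl
  | k :: ks' =>
    rw [show pvPairAll none (k :: ks') = pvPairAll (some k) ks' from rfl,
        pvPairAll_some_zip]
    rfl

lemma pvMain_core (c0 : Char) (t : List Char)
    (hc0 : (c0 == '-') = false)
    (hlast : (c0 :: t).getLast? ≠ some '-') :
    (if pvA_loop2 (pvA_countG t) t 0 then pvA_loop3 (c0 :: t) none else false)
    = (if (pvB_dashRuns (pvRuns (c0 :: t))).any (fun n => n != (pvB_dashRuns (pvRuns (c0 :: t))).headD 0) then false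
       else if decide (0 < (pvB_dashRuns (pvRuns (c0 :: t))).headD 0) && (pvB_letterRuns (pvRuns (c0 :: t))).any (fun n => n != 1) then false
       else
         (let kinds := ((c0 :: t).filter (fun c => c != '-')).map pvB_vowel
          (kinds.zip kinds.tail).all (fun p => p.1 != p.2))) := by
  have tlast : t.getLast? ≠ some '-' := by
    cases t with
    | nil => simp
    | cons c2 t2 =>
      rw [List.getLast?_cons_cons] at hlast
      exact hlast
  have hloop3 : pvA_loop3 (c0 :: t) none
      = (let kinds := ((c0 :: t).filter (fun c => c != '-')).map pvB_vowel
         (kinds.zip kinds.tail).all (fun p => p.1 != p.2)) := by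
    have h := pvLoop3_pairAll (c0 :: t) none
    simp only [pvEnc] at h
    rw [h, pvPairAll_zip]
  rw [pvLoop2_checkR (pvA_countG t) t 0 tlast, pvCountG_runs t]
  have hruns : pvRuns (c0 :: t) = pvConsFuse (false, 1) (pvRuns t) := by
    rw [show pvRuns (c0 :: t) = pvConsFuse ((c0 == '-'), 1) (pvRuns t) from rfl, hc0]
  match hrt : pvRuns t with
  | [] =>
    have he : pvRuns (c0 :: t) = [(false, 1)] := by rw [hruns, hrt]; rfl
    rw [he]
    simp [pvCheckR, pvHeadDash, pvB_dashRuns, pvB_letterRuns, hloop3]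
  | (false, m) :: tl =>
    have hm : 1 ≤ m := by
      simpa using pvRuns_pos t (false, m) (by rw [hrt]; exact List.mem_cons_self)
    have he : pvRuns (c0 :: t) = (false, 1 + m) :: tl := by
      rw [hruns, hrt]; simp [pvConsFuse]
    have hhd : pvHeadDash ((false, m) :: tl) = 0 := rfl
    have hz : pvCheckR 0 0 ((false, m) :: tl) = !(((false, m) :: tl).any (fun p => p.1)) := by
      apply pvCheckR_zero
      intro p hp
      exact pvRuns_pos t p (by rw [hrt]; exact hp)
    rw [he, hhd, hz]
    have hdr : pvB_dashRuns ((false, 1 + m) :: tl) = pvB_dashRuns tl := by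
      simp [pvB_dashRuns]
    have hlr : pvB_letterRuns ((false, 1 + m) :: tl) = (1 + m) :: pvB_letterRuns tl := by
      simp [pvB_letterRuns]
    rw [hdr, hlr]
    cases hany : tl.any (fun p => p.1) with
    | false =>
      have hds : pvB_dashRuns tl = [] := by
        simp only [pvB_dashRuns, List.map_eq_nil_iff, List.filter_eq_nil_iff]
        intro p hp
        have := List.any_eq_false.mp hany p hp
        simpa using this
      simp [hany, hds, hloop3]
    | true =>
      have hfalse : (!(((false, m) :: tl).any (fun p => p.1))) = false := by
        simp [hany]
      rw [hfalse]
      obtain ⟨p, hp, hpd⟩ := List.any_eq_true.mp hany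
      have hmem : p.2 ∈ pvB_dashRuns tl := by
        simp only [pvB_dashRuns, List.mem_map]
        exact ⟨p, List.mem_filter.mpr ⟨hp, hpd⟩, rfl⟩
      cases hcond : (pvB_dashRuns tl).any (fun n => n != (pvB_dashRuns tl).headD 0) with
      | true => simp [hcond]
      | false =>
        match hds : pvB_dashRuns tl with
        | [] => rw [hds] at hmem; exact absurd hmem (by simp)
        | x :: ds' =>
          have hx : 1 ≤ x := by
            have hxm : x ∈ pvB_dashRuns tl := by rw [hds]; exact List.mem_cons_self
            simp only [pvB_dashRuns, List.mem_map] at hxm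
            obtain ⟨q, hq, hqx⟩ := hxm
            have := pvRuns_pos t q (by rw [hrt]; exact List.mem_cons_of_mem _ (List.mem_filter.mp hq).1)
            omega
          have hm1 : ((1 + m) != (1 : Int)) = true := by simp; omega
          rw [hds] at hcond
          have hxd : (0 : Int) < x := by omega
          simp [hcond, hxd, hm1]
  | (true, n) :: tl =>
    have hn : 1 ≤ n := by
      simpa using pvRuns_pos t (true, n) (by rw [hrt]; exact List.mem_cons_self)
    have he : pvRuns (c0 :: t) = (false, 1) :: (true, n) :: tl := by
      rw [hruns, hrt]; rfl
    have hhd : pvHeadDash ((true, n) :: tl) = n := rfl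
    have hch : tl.IsChain (fun a b => a.1 ≠ b.1) := by
      have := pvRuns_alt t
      rw [hrt] at this
      cases tl with
      | nil => exact List.isChain_nil
      | cons q tl2 => exact (List.isChain_cons_cons.mp this).2
    have hhead : tl.head?.map Prod.fst ≠ some true := by
      cases tl with
      | nil => simp
      | cons q tl2 =>
        have := pvRuns_alt t
        rw [hrt] at this
        have h12 := (List.isChain_cons_cons.mp this).1
        simp only [List.head?_cons, Option.map_some]
        intro hq
        apply h12
        simpa using hq.symm
    have hck : pvCheckR n 0 ((true, n) :: tl) = pvAllRun n tl := by
      rw [show pvCheckR n 0 ((true, n) :: tl) = ((0 + n == n) && pvCheckR n n tl) from rfl]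
      have h0n : ((0 + n : Int) == n) = true := by simp
      rw [h0n, Bool.true_and]
      exact (pvCheckR_all n hn tl hch).1 hhead
    rw [he, hhd, hck]
    have hdr : pvB_dashRuns ((false, 1) :: (true, n) :: tl) = n :: pvB_dashRuns tl := by
      simp [pvB_dashRuns]
    have hlr : pvB_letterRuns ((false, 1) :: (true, n) :: tl) = 1 :: pvB_letterRuns tl := by
      simp [pvB_letterRuns]
    rw [hdr, hlr]
    have hsep : (n :: pvB_dashRuns tl).headD 0 = n := rfl
    rw [hsep]
    have hsplit : pvAllRun n tl
        = ((pvB_dashRuns tl).all (fun k => k == n) && (pvB_letterRuns tl).all (fun k => k == 1)) :=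
      pvAllRun_split n tl
    have hd1 : (pvB_dashRuns tl).all (fun k => k == n) = !((pvB_dashRuns tl).any (fun k => k != n)) :=
      (pvNotAnyNe _ _).symm
    have hd2 : (pvB_letterRuns tl).all (fun k => k == 1) = !((pvB_letterRuns tl).any (fun k => k != 1)) :=
      (pvNotAnyNe _ _).symm
    have hpos : (0 < n) := by omega
    cases ha1 : (pvB_dashRuns tl).any (fun k => k != n) with
    | true => simp [hsplit, hd1, ha1]
    | false =>
      cases ha2 : (pvB_letterRuns tl).any (fun k => k != 1) with
      | true => simp [hsplit, hd1, hd2, ha1, ha2, hpos]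
      | false => simp [hsplit, hd1, hd2, ha1, ha2, hloop3]

-- ===== VERDICT (by name: the statement is the Claim_ definition above) =====
theorem is_authentic_skewer_spec : Claim_equal_is_authentic_skewer := by
  intro s _ hpre
  unfold Pre_is_authentic_skewer at hpre
  unfold Spec_is_authentic_skewer
  match hl : s.toList with
  | [] => exact absurd hl hpre
  | c0 :: t =>
    have hcl : ∃ cl, (c0 :: t).getLast? = some cl := by
      cases hgl : (c0 :: t).getLast? with
      | none => exact absurd hgl (by simp)
      | some cl => exact ⟨cl, rfl⟩
    obtain ⟨cl, hgl⟩ := hcl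
    simp only [is_authentic_skewer, is_authentic_skewer_alt, hl,
      PySem.List.pyGet?_zero_cons, PySem.List.pyGet?_neg_one, hgl,
      PySem.List.slice_from_one, List.tail_cons, pvRuns_foldl]
    rw [show pvB_vowel = pvA_vowel from rfl]
    cases hg1 : (pvA_vowel c0 || c0 == '-') with
    | true => simp [hg1]
    | false =>
      cases hg2 : (pvA_vowel cl || cl == '-') with
      | true => simp [hg1, hg2]
      | false =>
        simp only [hg1, hg2, Bool.false_eq_true, if_false]
        have hc0 : (c0 == '-') = false := (Bool.or_eq_false_iff.mp hg1).2
        have hlast : (c0 :: t).getLast? ≠ some '-' := by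
          rw [hgl]
          intro h
          have hcl' : (cl == '-') = false := (Bool.or_eq_false_iff.mp hg2).2
          have hce : cl = '-' := by injection h
          simp [hce] at hcl'
        exact pvMain_core c0 t hc0 hlast
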